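-- pv_equiv track=rewrite | github.com/4drian04/single-layer-perceptron | main.py | check_succes_mistakes
-- ===== SOURCE A (Python) =====
-- def check_succes_mistakes(y_test, predicts):
--     success = 0
--     mistakes = 0
--     zeroSuccess=0
--     zeroMistakes=0
--     oneSuccess=0
--     oneMistakes=0
--     for i, j in zip(y_test, predicts):
--         if i==j:
--             success+=1
--             if i==1:
--                 oneSuccess+=1
--             else:
--                 zeroSuccess+=1
--         else:
--             mistakes+=1
--             if j==1 and i==0:
--                 zeroMistakes+=1 # Es decir, cuando en realidad debería haber sido uno pero ha dado 0
--             else: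
--                 oneMistakes+=1
--     return success, mistakes, zeroSuccess, zeroMistakes, oneSuccess, oneMistakes
-- ===== SOURCE B (Python) =====
-- def check_succes_mistakes(y_test, predicts):
--     pairs = list(zip(y_test, predicts))
--     total = len(pairs)
--     success = sum(i == j for i, j in pairs)
--     oneSuccess = pairs.count((1, 1))
--     zeroMistakes = pairs.count((0, 1))
--     mistakes = total - success
--     return (success, mistakes, success - oneSuccess, zeroMistakes,
--             oneSuccess, mistakes - zeroMistakes)
-- ===== Notes on version B (the rewrite author's own statement) =====
-- stated objective: alternative
-- what changed: Replaces A's single fold with six branching accumulators by independent whole-list counts on the zipped pairs (length, countP of equal pairs, counts of (1,1) and (0,1)) from which the six outputs are derived arithmetically.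
import Mathlib
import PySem

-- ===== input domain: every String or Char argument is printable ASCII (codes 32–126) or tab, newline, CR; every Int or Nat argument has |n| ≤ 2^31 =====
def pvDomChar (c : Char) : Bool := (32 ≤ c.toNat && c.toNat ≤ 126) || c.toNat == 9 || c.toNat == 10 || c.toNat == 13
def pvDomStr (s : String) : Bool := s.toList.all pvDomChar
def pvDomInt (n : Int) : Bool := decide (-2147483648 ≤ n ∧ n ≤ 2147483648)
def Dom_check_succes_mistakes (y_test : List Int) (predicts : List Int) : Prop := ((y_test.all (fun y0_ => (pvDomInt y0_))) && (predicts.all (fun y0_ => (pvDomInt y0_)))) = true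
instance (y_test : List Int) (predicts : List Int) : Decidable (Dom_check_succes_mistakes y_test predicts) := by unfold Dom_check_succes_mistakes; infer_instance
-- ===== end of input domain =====

-- B replaces A's single branching fold with independent whole-list counts and arithmetic
-- derivations (objective: alternative decomposition, same O(n) cost).

-- ===== PORT A =====
-- A: one pass over zip(y_test, predicts) updating six counters via nested branches.
def check_succes_mistakes (y_test : List Int) (predicts : List Int) : Int × Int × Int × Int × Int × Int :=
  (y_test.zip predicts).foldl
    (fun (st : Int × Int × Int × Int × Int × Int) (p : Int × Int) =>
      let (success, mistakes, zeroSuccess, zeroMistakes, oneSuccess, oneMistakes) := st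
      if p.1 == p.2 then
        if p.1 == 1 then
          (success + 1, mistakes, zeroSuccess, zeroMistakes, oneSuccess + 1, oneMistakes)
        else
          (success + 1, mistakes, zeroSuccess + 1, zeroMistakes, oneSuccess, oneMistakes)
      else
        if p.2 == 1 && p.1 == 0 then
          (success, mistakes + 1, zeroSuccess, zeroMistakes + 1, oneSuccess, oneMistakes)
        else
          (success, mistakes + 1, zeroSuccess, zeroMistakes, oneSuccess, oneMistakes + 1))
    (0, 0, 0, 0, 0, 0)

-- ===== PORT B =====
-- B: counts over the zipped pair list (sum of booleans = countP), rest derived by subtraction.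
def check_succes_mistakes_alt (y_test : List Int) (predicts : List Int) : Int × Int × Int × Int × Int × Int :=
  let pairs := y_test.zip predicts
  let total : Int := pairs.length
  let success : Int := pairs.countP (fun p => p.1 == p.2)
  let oneSuccess : Int := pairs.count (1, 1)
  let zeroMistakes : Int := pairs.count (0, 1)
  let mistakes : Int := total - success
  (success, mistakes, success - oneSuccess, zeroMistakes, oneSuccess, mistakes - zeroMistakes)

-- ===== PRECONDITION & SPEC =====
def Spec_check_succes_mistakes (y_test : List Int) (predicts : List Int) (out : Int × Int × Int × Int × Int × Int) : Prop := out = check_succes_mistakes_alt y_test predicts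
instance (y_test : List Int) (predicts : List Int) (out : Int × Int × Int × Int × Int × Int) : Decidable (Spec_check_succes_mistakes y_test predicts out) := by unfold Spec_check_succes_mistakes; infer_instance

-- ===== CLAIM (what is proved, stated in full; the proofs are below) =====
def Claim_equal_check_succes_mistakes : Prop := ∀ (y_test : List Int) (predicts : List Int), Dom_check_succes_mistakes y_test predicts → Spec_check_succes_mistakes y_test predicts (check_succes_mistakes y_test predicts)

-- ===== LEMMAS AND PROOFS =====

-- A's fold from an arbitrary accumulator, characterised by B's counts.
theorem foldA_eq (l : List (Int × Int)) :
    ∀ (s m zs zm os om : Int),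
      l.foldl
        (fun st p =>
          let (success, mistakes, zeroSuccess, zeroMistakes, oneSuccess, oneMistakes) := st
          if p.1 == p.2 then
            if p.1 == 1 then
              (success + 1, mistakes, zeroSuccess, zeroMistakes, oneSuccess + 1, oneMistakes)
            else
              (success + 1, mistakes, zeroSuccess + 1, zeroMistakes, oneSuccess, oneMistakes)
          else
            if p.2 == 1 && p.1 == 0 then
              (success, mistakes + 1, zeroSuccess, zeroMistakes + 1, oneSuccess, oneMistakes)
            else
              (success, mistakes + 1, zeroSuccess, zeroMistakes, oneSuccess, oneMistakes + 1))
        (s, m, zs, zm, os, om)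
      = (s + (l.countP (fun p => p.1 == p.2) : Int),
         m + ((l.length : Int) - (l.countP (fun p => p.1 == p.2) : Int)),
         zs + ((l.countP (fun p => p.1 == p.2) : Int) - (l.count ((1 : Int), (1 : Int)) : Int)),
         zm + (l.count ((0 : Int), (1 : Int)) : Int),
         os + (l.count ((1 : Int), (1 : Int)) : Int),
         om + (((l.length : Int) - (l.countP (fun p => p.1 == p.2) : Int)) - (l.count ((0 : Int), (1 : Int)) : Int))) := by
  induction l with
  | nil => intro s m zs zm os om; simp
  | cons p t ih =>
    intro s m zs zm os om
    obtain ⟨i, j⟩ := p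
    simp only [List.foldl_cons, List.countP_cons, List.count_cons, List.length_cons]
    by_cases hij : i = j
    · subst hij
      by_cases h1 : i = 1
      · subst h1
        simp only [beq_self_eq_true, if_true, ih]
        simp only [Prod.mk.injEq]
        refine ⟨?_, ?_, ?_, ?_, ?_, ?_⟩ <;> (try simp) <;> omega
      · have hb1 : ((i : Int) == 1) = false := by simp [h1]
        simp only [beq_self_eq_true, if_true, hb1, if_false, Bool.false_eq_true, ih]
        simp only [Prod.mk.injEq]
        refine ⟨?_, ?_, ?_, ?_, ?_, ?_⟩ <;> (try simp) <;> omega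
    · have hbeq : ((i : Int) == j) = false := by simp [hij]
      by_cases h01 : j = 1 ∧ i = 0
      · obtain ⟨hj, hi⟩ := h01
        subst hj; subst hi
        have hb2 : (((1:Int) == 1) && ((0:Int) == 0)) = true := by decide
        have he2 : ((((0:Int)), ((1:Int))) == (((1:Int)), ((1:Int)))) = false := by decide
        have he3 : ((((0:Int)), ((1:Int))) == (((0:Int)), ((1:Int)))) = true := by decide
        simp only [hbeq, hb2, he2, he3, Bool.false_eq_true, if_false, if_true, ih, Prod.mk.injEq]
        refine ⟨?_, ?_, ?_, ?_, ?_, ?_⟩ <;> (try simp) <;> omega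
      · have hb : (((j : Int) == 1) && ((i : Int) == 0)) = false := by
          rcases not_and_or.mp h01 with h | h <;> simp [h]
        simp only [hbeq, hb, Bool.false_eq_true, if_false, ih]
        simp only [Prod.mk.injEq]
        refine ⟨?_, ?_, ?_, ?_, ?_, ?_⟩ <;> (try simp) <;> omega

-- ===== VERDICT (by name: the statement is the Claim_ definition above) =====
theorem check_succes_mistakes_spec : Claim_equal_check_succes_mistakes := by
  intro y_test predicts _
  unfold Spec_check_succes_mistakes check_succes_mistakes check_succes_mistakes_alt
  rw [foldA_eq]
  simp
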